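-- pv_equiv track=rewrite | github.com/TalalAhmed311/Coding-Problems | sweet_and_savory.py | seperate_array
-- ===== SOURCE A (Python) =====
-- def seperate_array(arr):
--     postive,negative = [],[]
--
--     for value in arr:
--         if value>=0:
--             postive.append(value)
--         else:
--             negative.append(value)
--
--     return sorted(postive), sorted(negative,reverse=True)
-- ===== SOURCE B (Python) =====
-- def seperate_array(arr):
--     s = sorted(arr)
--     pos = [x for x in s if x >= 0]
--     neg = [x for x in s if x < 0]
--     neg.reverse()
--     return pos, neg
-- ===== Notes on version B (the rewrite author's own statement) =====
-- stated objective: alternative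
-- what changed: One global sort of the whole array followed by a partition scan (reversing the negative slice), instead of partitioning first and then running two separate sorts.
import Mathlib
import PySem

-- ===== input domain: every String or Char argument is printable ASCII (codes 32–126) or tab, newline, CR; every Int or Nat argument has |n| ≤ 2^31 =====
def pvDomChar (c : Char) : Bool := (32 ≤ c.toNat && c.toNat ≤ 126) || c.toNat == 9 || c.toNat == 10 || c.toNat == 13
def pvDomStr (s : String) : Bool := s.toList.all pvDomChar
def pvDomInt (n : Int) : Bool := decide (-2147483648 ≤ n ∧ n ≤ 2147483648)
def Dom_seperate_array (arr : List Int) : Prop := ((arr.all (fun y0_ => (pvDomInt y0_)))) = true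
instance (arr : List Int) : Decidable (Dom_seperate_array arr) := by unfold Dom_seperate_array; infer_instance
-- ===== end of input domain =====

-- B changes the decomposition: one global sort then a partition scan, instead of partition then two sorts; same cost ("alternative").

-- ===== PORT A =====
-- A: partition arr into postive/negative with a loop, then sort each (negatives reversed).
def seperate_array (arr : List Int) : List Int × List Int :=
  let pn := arr.foldl
    (fun (acc : List Int × List Int) value =>
      if 0 ≤ value then (acc.1 ++ [value], acc.2) else (acc.1, acc.2 ++ [value]))
    ([], [])
  (PySem.List.sorted pn.1 (fun x => x) false, PySem.List.sorted pn.2 (fun x => x) true)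

-- ===== PORT B =====
-- B: sort once, then filter the sorted list; reverse the negative part.
def seperate_array_alt (arr : List Int) : List Int × List Int :=
  let s := PySem.List.sorted arr (fun x => x) false
  let pos := s.filter (fun x => decide (0 ≤ x))
  let neg := s.filter (fun x => decide (x < 0))
  (pos, neg.reverse)

-- ===== PRECONDITION & SPEC =====
def Spec_seperate_array (arr : List Int) (out : List Int × List Int) : Prop := out = seperate_array_alt arr
instance (arr : List Int) (out : List Int × List Int) : Decidable (Spec_seperate_array arr out) := by unfold Spec_seperate_array; infer_instance

-- ===== CLAIM (what is proved, stated in full; the proofs are below) =====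
def Claim_equal_seperate_array : Prop := ∀ (arr : List Int), Dom_seperate_array arr → Spec_seperate_array arr (seperate_array arr)

-- ===== LEMMAS AND PROOFS =====

-- A's partition loop is filtering.
theorem foldl_partition (arr p n : List Int) :
    arr.foldl
      (fun (acc : List Int × List Int) value =>
        if 0 ≤ value then (acc.1 ++ [value], acc.2) else (acc.1, acc.2 ++ [value]))
      (p, n)
    = (p ++ arr.filter (fun x => decide (0 ≤ x)), n ++ arr.filter (fun x => decide (x < 0))) := by
  induction arr generalizing p n with
  | nil => simp
  | cons a t ih =>
    by_cases h : 0 ≤ a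
    · simp [List.foldl_cons, h, ih]
    · have h' : a < 0 := by omega
      simp [List.foldl_cons, h, ih, List.filter_cons, h']

-- sorting with reverse=True is the reverse of sorting ascending (identity key, so ties are equal values).
theorem sorted_rev_eq_reverse (xs : List Int) :
    PySem.List.sorted xs (fun x => x) true = (PySem.List.sorted xs (fun x => x) false).reverse := by
  have h1 : PySem.List.sorted xs (fun x => x) false
      = (PySem.List.sorted xs (fun x => x) true).reverse := by
    apply PySem.List.sorted_id_eq_of_perm_of_pairwise
    · exact (List.reverse_perm _).trans (PySem.List.sorted_perm xs _ true)
    · rw [List.pairwise_reverse]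
      exact PySem.List.sorted_pairwise_rev xs (fun x => x)
  rw [h1, List.reverse_reverse]

-- sorting a filtered list = filtering the sorted list (identity key).
theorem sorted_filter_comm (xs : List Int) (p : Int → Bool) :
    PySem.List.sorted (xs.filter p) (fun x => x) false
      = (PySem.List.sorted xs (fun x => x) false).filter p := by
  apply PySem.List.sorted_id_eq_of_perm_of_pairwise
  · exact List.Perm.filter p (PySem.List.sorted_perm xs _ false)
  · exact List.Pairwise.filter p (PySem.List.sorted_pairwise xs (fun x => x))

-- ===== VERDICT (by name: the statement is the Claim_ definition above) =====
theorem seperate_array_spec : Claim_equal_seperate_array := by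
  intro arr _
  unfold Spec_seperate_array seperate_array seperate_array_alt
  rw [foldl_partition arr [] []]
  simp only [List.nil_append]
  rw [sorted_filter_comm arr (fun x => decide (0 ≤ x)),
      sorted_rev_eq_reverse, sorted_filter_comm arr (fun x => decide (x < 0))]
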